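-- pv_equiv track=rewrite | github.com/ozdemirzekeriya29-afk/urun-bulucu-api | main.py | metin_ile_bul
-- ===== SOURCE A (Python) =====
-- def metin_ile_bul(okunan_metinler, veritabani):
--     """
--     OCR ile okunan kelimeleri veritabanındaki etiketlerle karşılaştırır.
--     """
--     # Okunan her kelimeyi küçük harfe çevir
--     okunanlar = [kelime.lower() for kelime in okunan_metinler]
--
--     en_iyi_kod = None
--     en_cok_eslesme = 0
--
--     for kod, detay in veritabani.items():
--         etiketler = detay.get("etiketler", [])
--
--         # Kaç tane ortak kelime var?
--         eslesme_sayisi = 0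
--         for etiket in etiketler:
--             # Eğer etiket, okunan metnin içinde geçiyorsa (Örn: "BURGU" bulunduysa)
--             if any(etiket in okunan for okunan in okunanlar):
--                 eslesme_sayisi += 1
--
--         # En az 2 kelime tutmalı (Örn: Hem "Arbella" Hem "Burgu")
--         # Tek kelime yetmez, çünkü "Arbella" hepsinde yazar.
--         if eslesme_sayisi >= 2 and eslesme_sayisi > en_cok_eslesme:
--             en_cok_eslesme = eslesme_sayisi
--             en_iyi_kod = kod
--
--     return en_iyi_kod, en_cok_eslesme
-- ===== SOURCE B (Python) =====
-- def metin_ile_bul(okunan_metinler, veritabani):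
--     # Precompute the set of all substrings of the lowered read words;
--     # each tag is then matched with one set lookup.
--     subs = set()
--     for kelime in okunan_metinler:
--         k = kelime.lower()
--         n = len(k)
--         for i in range(n + 1):
--             for j in range(i, n + 1):
--                 subs.add(k[i:j])
--     en_iyi_kod = None
--     en_cok_eslesme = 0
--     for kod, detay in veritabani.items():
--         eslesme_sayisi = sum(1 for etiket in detay.get("etiketler", []) if etiket in subs)
--         if eslesme_sayisi >= 2 and eslesme_sayisi > en_cok_eslesme:
--             en_iyi_kod = kod
--             en_cok_eslesme = eslesme_sayisi
--     return en_iyi_kod, en_cok_eslesme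
-- ===== Notes on version B (the rewrite author's own statement) =====
-- stated objective: alternative
-- what changed: B precomputes the set of all substrings of the lowered OCR words once and tests each tag by one set lookup, replacing A's per-tag substring scan over every word; it trades the per-tag scans for an upfront O(len^2)-substring index build.
import Mathlib
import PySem

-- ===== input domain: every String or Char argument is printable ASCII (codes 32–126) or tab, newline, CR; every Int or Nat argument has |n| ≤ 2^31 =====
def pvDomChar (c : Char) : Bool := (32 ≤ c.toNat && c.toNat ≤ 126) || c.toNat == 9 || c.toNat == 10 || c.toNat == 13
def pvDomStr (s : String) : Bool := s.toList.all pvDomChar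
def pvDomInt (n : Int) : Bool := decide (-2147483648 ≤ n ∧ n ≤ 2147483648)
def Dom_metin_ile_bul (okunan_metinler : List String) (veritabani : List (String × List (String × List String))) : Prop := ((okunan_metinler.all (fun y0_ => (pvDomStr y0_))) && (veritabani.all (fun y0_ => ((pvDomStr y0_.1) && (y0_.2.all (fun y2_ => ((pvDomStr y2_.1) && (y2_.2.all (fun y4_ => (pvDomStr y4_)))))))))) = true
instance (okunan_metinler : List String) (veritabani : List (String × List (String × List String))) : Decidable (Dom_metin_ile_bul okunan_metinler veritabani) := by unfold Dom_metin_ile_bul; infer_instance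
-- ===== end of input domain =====

-- B replaces A's per-tag scan over all read words by a precomputed substring-set index queried once per tag (alternative algorithm, same results).

-- ===== PORT A =====
def metin_ile_bul (okunan_metinler : List String) (veritabani : List (String × List (String × List String))) : Option String × Int :=
  let okunanlar := okunan_metinler.map (fun kelime => PySem.Str.lower kelime)
  veritabani.foldl (fun st kd =>
    let etiketler := (PySem.Dict.mk kd.2).getD "etiketler" []
    let eslesme_sayisi := etiketler.foldl (fun acc etiket =>
      if okunanlar.any (fun okunan => PySem.Str.isIn etiket okunan) then acc + 1 else acc) (0 : Int)
    if 2 ≤ eslesme_sayisi ∧ st.2 < eslesme_sayisi then (some kd.1, eslesme_sayisi) else st)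
    ((none : Option String), (0 : Int))

-- ===== PORT B =====
-- all substrings of the lowered word, added to the accumulator set (Source B's nested i/j loops)
def pvAddSubs (subs : PySem.Set String) (kelime : String) : PySem.Set String :=
  let k := PySem.Str.lower kelime
  let n : Int := PySem.Str.len k
  (PySem.List.pyRange 0 (n + 1)).foldl (fun s i =>
    (PySem.List.pyRange i (n + 1)).foldl (fun s j =>
      PySem.Set.add s (PySem.Str.slice k (some i) (some j))) s) subs

def metin_ile_bul_alt (okunan_metinler : List String) (veritabani : List (String × List (String × List String))) : Option String × Int :=
  let subs := okunan_metinler.foldl pvAddSubs PySem.Set.empty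
  veritabani.foldl (fun st kd =>
    let eslesme_sayisi : Int :=
      (((PySem.Dict.mk kd.2).getD "etiketler" []).countP (fun etiket => PySem.Set.contains subs etiket) : Nat)
    if 2 ≤ eslesme_sayisi ∧ st.2 < eslesme_sayisi then (some kd.1, eslesme_sayisi) else st)
    ((none : Option String), (0 : Int))

-- ===== PRECONDITION & SPEC =====
def Spec_metin_ile_bul (okunan_metinler : List String) (veritabani : List (String × List (String × List String))) (out : Option String × Int) : Prop := out = metin_ile_bul_alt okunan_metinler veritabani
instance (okunan_metinler : List String) (veritabani : List (String × List (String × List String))) (out : Option String × Int) : Decidable (Spec_metin_ile_bul okunan_metinler veritabani out) := by unfold Spec_metin_ile_bul; infer_instance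

-- ===== CLAIM (what is proved, stated in full; the proofs are below) =====
def Claim_equal_metin_ile_bul : Prop := ∀ (okunan_metinler : List String) (veritabani : List (String × List (String × List String))), Dom_metin_ile_bul okunan_metinler veritabani → Spec_metin_ile_bul okunan_metinler veritabani (metin_ile_bul okunan_metinler veritabani)

-- ===== LEMMAS AND PROOFS =====

-- membership in a fold of Set.add over a list of generated elements
theorem pv_mem_foldl_add {α : Type} (l : List α) (f : α → String) (s : PySem.Set String) (x : String) :
    x ∈ l.foldl (fun s y => PySem.Set.add s (f y)) s ↔ x ∈ s ∨ ∃ y ∈ l, x = f y := by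
  induction l generalizing s with
  | nil => simp
  | cons a t ih =>
    simp only [List.foldl_cons, ih, PySem.Set.mem_add, List.mem_cons]
    constructor
    · rintro (((h | h) | ⟨y, hy, rfl⟩))
      · exact Or.inl h
      · exact Or.inr ⟨a, Or.inl rfl, h⟩
      · exact Or.inr ⟨y, Or.inr hy, rfl⟩
    · rintro (h | ⟨y, (rfl | hy), rfl⟩)
      · exact Or.inl (Or.inl h)
      · exact Or.inl (Or.inr rfl)
      · exact Or.inr ⟨y, hy, rfl⟩

-- the slices produced by the two index loops are exactly the substrings
theorem pv_slices_iff_isIn (kl x : String) :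
    (∃ i ∈ PySem.List.pyRange 0 (PySem.Str.len kl + 1), ∃ j ∈ PySem.List.pyRange i (PySem.Str.len kl + 1),
        x = PySem.Str.slice kl (some i) (some j))
    ↔ PySem.Str.isIn x kl = true := by
  rw [PySem.Str.isIn_iff_infix]
  constructor
  · rintro ⟨i, hi, j, hj, rfl⟩
    rw [PySem.List.mem_pyRange_one] at hi hj
    have h0i : 0 ≤ i := hi.1
    have h0j : 0 ≤ j := le_trans h0i hj.1
    have hts : (PySem.Str.slice kl (some i) (some j)).toList
        = (kl.toList.drop i.toNat).take (j.toNat - i.toNat) := by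
      rw [PySem.Str.toList_slice, PySem.Chars.slice_eq_listSlice, PySem.List.slice_toNat _ h0i h0j]
    rw [hts]
    exact ((List.take_prefix _ _).isInfix).trans ((List.drop_suffix _ _).isInfix)
  · intro h
    obtain ⟨pre, suf, hps⟩ := h
    have hlen : pre.length + x.toList.length + suf.length = kl.toList.length := by
      have := congrArg List.length hps
      simp only [List.length_append] at this
      omega
    have hklen : PySem.Str.len kl = (kl.toList.length : Int) := PySem.Str.len_eq kl
    refine ⟨(pre.length : Int), ?_, ((pre.length : Int) + (x.toList.length : Int)), ?_, ?_⟩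
    · rw [PySem.List.mem_pyRange_one, hklen]
      omega
    · rw [PySem.List.mem_pyRange_one, hklen]
      omega
    · apply String.toList_inj.mp
      rw [PySem.Str.toList_slice, PySem.Chars.slice_eq_listSlice,
        PySem.List.slice_natCast_add kl.toList pre.length x.toList.length]
      have hk : kl.toList = pre ++ (x.toList ++ suf) := by
        rw [← hps]; simp [List.append_assoc]
      rw [hk, List.drop_left, List.take_left]

-- membership after adding all slices of one word
theorem pv_mem_pvAddSubs (s : PySem.Set String) (k : String) (x : String) :
    x ∈ pvAddSubs s k ↔ x ∈ s ∨ PySem.Str.isIn x (PySem.Str.lower k) = true := by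
  unfold pvAddSubs
  simp only []
  have hnest : ∀ (L : List Int) (s : PySem.Set String),
      x ∈ L.foldl (fun s i => (PySem.List.pyRange i (PySem.Str.len (PySem.Str.lower k) + 1)).foldl
          (fun s j => PySem.Set.add s (PySem.Str.slice (PySem.Str.lower k) (some i) (some j))) s) s
      ↔ x ∈ s ∨ ∃ i ∈ L, ∃ j ∈ PySem.List.pyRange i (PySem.Str.len (PySem.Str.lower k) + 1),
          x = PySem.Str.slice (PySem.Str.lower k) (some i) (some j) := by
    intro L
    induction L with
    | nil => intro s; simp
    | cons a t ih =>
      intro s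
      simp only [List.foldl_cons, ih, pv_mem_foldl_add, List.mem_cons]
      constructor
      · rintro ((h | ⟨j, hj, rfl⟩) | ⟨i, hi, j, hj, rfl⟩)
        · exact Or.inl h
        · exact Or.inr ⟨a, Or.inl rfl, j, hj, rfl⟩
        · exact Or.inr ⟨i, Or.inr hi, j, hj, rfl⟩
      · rintro (h | ⟨i, (rfl | hi), j, hj, rfl⟩)
        · exact Or.inl (Or.inl h)
        · exact Or.inl (Or.inr ⟨j, hj, rfl⟩)
        · exact Or.inr ⟨i, hi, j, hj, rfl⟩
  rw [hnest]
  exact or_congr Iff.rfl (pv_slices_iff_isIn (PySem.Str.lower k) x)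

-- membership in the whole substring set
theorem pv_mem_subs (ws : List String) (s : PySem.Set String) (x : String) :
    x ∈ ws.foldl pvAddSubs s ↔ x ∈ s ∨ ∃ w ∈ ws, PySem.Str.isIn x (PySem.Str.lower w) = true := by
  induction ws generalizing s with
  | nil => simp
  | cons a t ih =>
    simp only [List.foldl_cons, ih, pv_mem_pvAddSubs, List.mem_cons]
    constructor
    · rintro ((h | h) | ⟨w, hw, hin⟩)
      · exact Or.inl h
      · exact Or.inr ⟨a, Or.inl rfl, h⟩
      · exact Or.inr ⟨w, Or.inr hw, hin⟩
    · rintro (h | ⟨w, (rfl | hw), hin⟩)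
      · exact Or.inl (Or.inl h)
      · exact Or.inl (Or.inr hin)
      · exact Or.inr ⟨w, hw, hin⟩

-- the two per-tag tests agree
theorem pv_pred_eq (ws : List String) (x : String) :
    PySem.Set.contains (ws.foldl pvAddSubs PySem.Set.empty) x
      = (ws.map (fun kelime => PySem.Str.lower kelime)).any (fun okunan => PySem.Str.isIn x okunan) := by
  apply Bool.coe_iff_coe.mp
  have hc : PySem.Set.contains (ws.foldl pvAddSubs PySem.Set.empty) x = true
      ↔ x ∈ ws.foldl pvAddSubs PySem.Set.empty := by
    simp [PySem.Set.contains]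
  rw [hc, pv_mem_subs]
  simp [PySem.Set.empty, List.any_map, Function.comp]

-- ===== VERDICT (by name: the statement is the Claim_ definition above) =====
theorem metin_ile_bul_spec : Claim_equal_metin_ile_bul := by
  intro oks db _
  unfold Spec_metin_ile_bul
  simp only [metin_ile_bul, metin_ile_bul_alt]
  congr 1
  funext st kd
  rw [PySem.List.foldl_count_if]
  have hp : (fun etiket => ((oks.map (fun kelime => PySem.Str.lower kelime)).any
        (fun okunan => PySem.Str.isIn etiket okunan)))
      = (fun etiket => PySem.Set.contains (oks.foldl pvAddSubs PySem.Set.empty) etiket) := by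
    funext t
    exact (pv_pred_eq oks t).symm
  rw [hp]
  simp
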